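-- pv_equiv track=rewrite | github.com/RuneweaverStudios/dietmcp | src/dietmcp/formatters/toon_formatter.py | _is_uniform_object_array
-- ===== SOURCE A (Python) =====
-- from typing import Any
--
-- def _is_uniform_object_array(data: list[Any]) -> bool:
--     """Check if data is a uniform array of objects with identical keys."""
--     if not data:
--         return False
--
--     if not isinstance(data[0], dict):
--         return False
--
--     # Get keys from first object
--     first_keys = set(data[0].keys())
--
--     # Check all objects have same keys
--     for item in data[1:]:
--         if not isinstance(item, dict):
--             return False
--         if set(item.keys()) != first_keys:
--             return False
--
--     return True
-- ===== SOURCE B (Python) =====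
-- def _is_uniform_object_array(data: list) -> bool:
--     """Uniform dict array iff every element is a dict and exactly one
--     distinct key-set signature occurs across all elements."""
--     if not data or not all(isinstance(item, dict) for item in data):
--         return False
--     signatures = {frozenset(item.keys()) for item in data}
--     return len(signatures) == 1
-- ===== Notes on version B (the rewrite author's own statement) =====
-- stated objective: alternative
-- what changed: Instead of fixing the first element's key-set as a reference and comparing every later element to it, B collects the set of distinct frozenset key-signatures over all elements and returns whether exactly one exists.
import Mathlib
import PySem

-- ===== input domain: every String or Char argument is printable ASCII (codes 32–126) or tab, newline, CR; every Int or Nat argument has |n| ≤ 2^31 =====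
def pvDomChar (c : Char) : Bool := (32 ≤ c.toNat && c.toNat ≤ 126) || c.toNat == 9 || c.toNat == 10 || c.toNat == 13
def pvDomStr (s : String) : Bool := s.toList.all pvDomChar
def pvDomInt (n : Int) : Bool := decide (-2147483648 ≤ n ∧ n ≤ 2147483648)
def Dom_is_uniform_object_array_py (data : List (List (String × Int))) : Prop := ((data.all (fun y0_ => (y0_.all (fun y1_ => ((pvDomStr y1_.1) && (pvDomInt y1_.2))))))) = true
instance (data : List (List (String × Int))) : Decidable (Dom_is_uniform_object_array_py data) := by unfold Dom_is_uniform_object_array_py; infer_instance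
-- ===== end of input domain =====

-- B replaces A's compare-each-to-the-first-element pass by collecting the set of
-- distinct key-set signatures over all elements and testing that exactly one exists.


-- ===== PORT A =====
-- set(item.keys()) for a dict given as an association list
def pvKeySet (item : List (String × Int)) : PySem.Set String :=
  PySem.Set.ofList (item.map Prod.fst)

def is_uniform_object_array_py (data : List (List (String × Int))) : Bool :=
  match data with
  | [] => false                     -- if not data: return False
  | d0 :: rest =>
    -- isinstance(data[0], dict) is always true under the ported type
    let firstKeys := pvKeySet d0    -- first_keys = set(data[0].keys())
    -- for item in data[1:]: if set(item.keys()) != first_keys: return False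
    rest.all (fun item => PySem.Set.equal (pvKeySet item) firstKeys)

-- ===== PORT B =====
-- signatures = {frozenset(item.keys()) for item in data}: a set OF sets, built by hand
-- because membership must compare elements by frozenset equality (Set.equal), which is
-- exact here since only len(signatures) is consumed (no iteration order).
def pvAddSig (acc : List (PySem.Set String)) (s : PySem.Set String) : List (PySem.Set String) :=
  if acc.any (fun t => PySem.Set.equal t s) then acc else acc ++ [s]

def is_uniform_object_array_py_alt (data : List (List (String × Int))) : Bool :=
  match data with
  | [] => false                     -- 'not data' (all isinstance holds by the ported type)
  | _ :: _ =>
    let sigs := data.foldl (fun acc item => pvAddSig acc (pvKeySet item)) []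
    sigs.length == 1                -- len(signatures) == 1

-- ===== PRECONDITION & SPEC =====
def Spec_is_uniform_object_array_py (data : List (List (String × Int))) (out : Bool) : Prop := out = is_uniform_object_array_py_alt data
instance (data : List (List (String × Int))) (out : Bool) : Decidable (Spec_is_uniform_object_array_py data out) := by unfold Spec_is_uniform_object_array_py; infer_instance

-- ===== CLAIM (what is proved, stated in full; the proofs are below) =====
def Claim_equal_is_uniform_object_array_py : Prop := ∀ (data : List (List (String × Int))), Dom_is_uniform_object_array_py data → Spec_is_uniform_object_array_py data (is_uniform_object_array_py data)

-- ===== LEMMAS AND PROOFS =====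

theorem pvSetEqual_comm (s t : PySem.Set String) : PySem.Set.equal s t = PySem.Set.equal t s := by
  simp [PySem.Set.equal, Bool.and_comm]

theorem pvFoldl_len_ge (rest : List (List (String × Int))) (acc : List (PySem.Set String)) :
    acc.length ≤ (rest.foldl (fun acc item => pvAddSig acc (pvKeySet item)) acc).length := by
  induction rest generalizing acc with
  | nil => simp
  | cons d tl ih =>
    refine le_trans ?_ (ih (pvAddSig acc (pvKeySet d)))
    unfold pvAddSig; split <;> simp

theorem pvFoldl_single (rest : List (List (String × Int))) (s0 : PySem.Set String) :
    ((rest.foldl (fun acc item => pvAddSig acc (pvKeySet item)) [s0]).length == 1)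
      = rest.all (fun item => PySem.Set.equal (pvKeySet item) s0) := by
  induction rest with
  | nil => simp
  | cons d tl ih =>
    simp only [List.foldl_cons, List.all_cons]
    by_cases h : PySem.Set.equal (pvKeySet d) s0 = true
    · have : pvAddSig [s0] (pvKeySet d) = [s0] := by
        unfold pvAddSig
        simp [pvSetEqual_comm s0 (pvKeySet d), h]
      rw [this, ih, h, Bool.true_and]
    · have hadd : pvAddSig [s0] (pvKeySet d) = [s0, pvKeySet d] := by
        unfold pvAddSig
        simp [pvSetEqual_comm s0 (pvKeySet d), h]
      rw [hadd]
      have hge := pvFoldl_len_ge tl [s0, pvKeySet d]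
      simp only [List.length_cons, List.length_nil] at hge
      have : ((tl.foldl (fun acc item => pvAddSig acc (pvKeySet item)) [s0, pvKeySet d]).length == 1) = false := by
        simp only [beq_eq_false_iff_ne]; omega
      rw [this]
      simp [h]

-- ===== VERDICT (by name: the statement is the Claim_ definition above) =====
theorem is_uniform_object_array_py_spec : Claim_equal_is_uniform_object_array_py := by
  intro data _
  unfold Spec_is_uniform_object_array_py is_uniform_object_array_py is_uniform_object_array_py_alt
  match data with
  | [] => rfl
  | d0 :: rest =>
    simp only [List.foldl_cons]
    have h0 : pvAddSig [] (pvKeySet d0) = [pvKeySet d0] := by unfold pvAddSig; simp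
    rw [h0, pvFoldl_single]
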